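-- pv_equiv track=rewrite | github.com/eliottcassidy2000/math | 04-computation/degree4_proof_n7.py | count_directed_cycles_with_edges
-- ===== SOURCE A (Python) =====
-- from itertools import combinations, permutations
--
-- def directed_sign(u, v):
--     return 1 if u < v else -1
--
-- def count_directed_cycles_with_edges(k, target_edges, n_verts):
--     """Count directed k-cycles containing all target edges, with sign product."""
--     target_set = set(target_edges)
--     target_verts = set()
--     for e in target_set: target_verts.update(e)
--     total = 0
--     if k == n_verts:
--         subsets = [list(range(n_verts))]
--     else:
--         other = set(range(n_verts)) - target_verts
--         need = k - len(target_verts)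
--         if need < 0: return 0
--         subsets = [sorted(target_verts | set(extra)) for extra in combinations(other, need)]
--     for subset in subsets:
--         v0 = subset[0]
--         rest = [v for v in subset if v != v0]
--         for perm in permutations(rest):
--             cycle = (v0,) + perm
--             ce = []
--             for i in range(k):
--                 u, v = cycle[i], cycle[(i+1) % k]
--                 ce.append(((min(u,v), max(u,v)), directed_sign(u, v)))
--             mtch = [p for p, (e, _) in enumerate(ce) if e in target_set]
--             if len(mtch) != len(target_set): continue
--             if set(ce[p][0] for p in mtch) != target_set: continue
--             sp = 1
--             for p in mtch: sp *= ce[p][1]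
--             total += sp
--     return total
-- ===== SOURCE B (Python) =====
-- from itertools import combinations
--
-- def _splits(xs):
--     """All ways to pick one element of xs, paired with the untouched remainder."""
--     if not xs:
--         return []
--     w, tail = xs[0], xs[1:]
--     return [(w, tail)] + [(y, [w] + ys) for (y, ys) in _splits(tail)]
--
-- def _edge_info(u, v):
--     return ((u, v) if u < v else (v, u)), (1 if u < v else -1)
--
-- def _dfs(target_set, tlen, v0, last, remaining, sign, matched):
--     """Extend the cycle one vertex at a time, tracking the sign product and the
--     matched target edges incrementally; prune once a further match cannot help."""
--     if not remaining:
--         e, s = _edge_info(last, v0)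
--         if e in target_set:
--             sign, matched = sign * s, matched + [e]
--         return sign if len(matched) == tlen and set(matched) == target_set else 0
--     acc = 0
--     for w, rem in _splits(remaining):
--         e, s = _edge_info(last, w)
--         if e in target_set:
--             if len(matched) < tlen:
--                 acc += _dfs(target_set, tlen, v0, w, rem, sign * s, matched + [e])
--         else:
--             acc += _dfs(target_set, tlen, v0, w, rem, sign, matched)
--     return acc
--
-- def count_directed_cycles_with_edges(k, target_edges, n_verts):
--     """Count directed k-cycles containing all target edges, with sign product.
--     Backtracking re-implementation: no permutation tuples or edge lists are
--     materialized; sign and matches are accumulated while the cycle is built."""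
--     target_set = set(target_edges)
--     tlen = len(target_set)
--     target_verts = set()
--     for e in target_set:
--         target_verts.update(e)
--     if k == n_verts:
--         subsets = [list(range(n_verts))]
--     else:
--         other = set(range(n_verts)) - target_verts
--         need = k - len(target_verts)
--         if need < 0:
--             return 0
--         subsets = [sorted(target_verts | set(extra)) for extra in combinations(other, need)]
--     total = 0
--     for subset in subsets:
--         v0 = subset[0]
--         rest = [v for v in subset if v != v0]
--         total += _dfs(target_set, tlen, v0, v0, rest, 1, [])
--     return total
-- ===== Notes on version B (the rewrite author's own statement) =====
-- stated objective: alternative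
-- what changed: Replaces A's per-subset enumeration of whole permutation tuples followed by three passes over each candidate cycle (build the k-edge list, collect matching positions, set-compare, then a sign-product loop) with a recursive backtracking search that extends the cycle one vertex at a time, accumulating the sign product and the matched target edges on the fly and pruning a branch as soon as it has matched more target edges than exist.
import Mathlib
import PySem

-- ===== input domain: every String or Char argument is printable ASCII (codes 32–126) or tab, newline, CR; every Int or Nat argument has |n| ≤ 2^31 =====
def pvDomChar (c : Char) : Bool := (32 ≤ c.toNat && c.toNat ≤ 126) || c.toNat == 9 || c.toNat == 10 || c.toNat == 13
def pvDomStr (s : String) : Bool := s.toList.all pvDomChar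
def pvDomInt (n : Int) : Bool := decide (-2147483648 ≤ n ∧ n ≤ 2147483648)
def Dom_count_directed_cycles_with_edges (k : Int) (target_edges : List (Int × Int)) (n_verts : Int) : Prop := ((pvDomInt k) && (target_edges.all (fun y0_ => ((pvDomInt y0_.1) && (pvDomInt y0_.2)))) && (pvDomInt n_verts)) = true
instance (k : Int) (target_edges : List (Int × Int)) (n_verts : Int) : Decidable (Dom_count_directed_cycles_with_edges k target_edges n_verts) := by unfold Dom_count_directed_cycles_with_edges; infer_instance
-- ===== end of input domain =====

-- ===== PORT A =====
-- header: B rebuilds each signed cycle count by backtracking (incremental sign/match tracking)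
-- instead of A's permutation tuples + three passes per cycle; equal on all inputs where A returns.

def directed_sign (u : Int) (v : Int) : Int := if u < v then 1 else -1

-- the shared tail loop of A ('for subset in subsets: ...'), extracted as a helper
def pvLoopA (k : Int) (target_set : PySem.Set (Int × Int)) (subsets : List (List Int)) : Int :=
  subsets.foldl (fun total subset =>
    match subset with
    | [] => total  -- Python raises IndexError on subset[0] here; unreachable under Pre_
    | v0 :: _ =>
      let rest := subset.filter (fun v => v != v0)
      (PySem.List.permutations rest rest.length).foldl (fun total perm =>
        let cycle := v0 :: perm
        let ce := (PySem.List.pyRange 0 k 1).map (fun i =>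
          let u := PySem.List.pyGetD cycle i 0
          let v := PySem.List.pyGetD cycle (PySem.Int.mod (i + 1) k) 0
          ((min u v, max u v), directed_sign u v))
        let mtch := ((PySem.List.enumerate ce).filter
          (fun pes => PySem.Set.contains target_set pes.2.1)).map (fun pes => pes.1)
        if (mtch.length : Int) ≠ PySem.Set.len target_set then total
        else if PySem.Set.equal
            (PySem.Set.ofList (mtch.map (fun p => (PySem.List.pyGetD ce p ((0, 0), 0)).1)))
            target_set = false then total
        else total + mtch.foldl (fun sp p => sp * (PySem.List.pyGetD ce p ((0, 0), 0)).2) 1)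
        total) 0

def count_directed_cycles_with_edges (k : Int) (target_edges : List (Int × Int)) (n_verts : Int) : Int :=
  let target_set : PySem.Set (Int × Int) := PySem.Set.ofList target_edges
  -- 'for e in target_set: target_verts.update(e)': the set's iteration order is immaterial here,
  -- target_verts is only consumed via len / membership / union-then-sorted (all order-independent)
  let target_verts : PySem.Set Int :=
    target_set.foldl (fun s e => PySem.Set.add (PySem.Set.add s e.1) e.2) PySem.Set.empty
  if k == n_verts then
    pvLoopA k target_set [PySem.List.pyRange 0 n_verts 1]
  else
    -- CPython iterates this small-int set ascendingly; it only affects the ORDER of subsets,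
    -- and the result is a sum over all of them
    let other : PySem.Set Int :=
      PySem.Set.diff (PySem.Set.ofList (PySem.List.pyRange 0 n_verts 1)) target_verts
    let need : Int := k - PySem.Set.len target_verts
    if need < 0 then 0
    else
      -- itertools.combinations yields nothing when r > len(pool); short-circuited so the
      -- port also evaluates fast there (same value: combinations_eq_nil_of_length_lt)
      pvLoopA k target_set
        ((if other.length < need.toNat then []
          else PySem.List.combinations other need.toNat).map (fun extra =>
          PySem.List.sorted (PySem.Set.union target_verts extra) (fun x => x) false))

-- ===== PORT B =====
def pvSplits {α : Type} : List α → List (α × List α)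
  | [] => []
  | w :: tail => (w, tail) :: (pvSplits tail).map (fun p => (p.1, w :: p.2))

-- needed by pvDfs's termination proof
theorem pvSplits_length {α : Type} :
    ∀ (xs : List α) (p : α × List α), p ∈ pvSplits xs → p.2.length + 1 = xs.length := by
  intro xs
  induction xs with
  | nil => intro p hp; simp [pvSplits] at hp
  | cons w tail ih =>
    intro p hp
    simp only [pvSplits, List.mem_cons, List.mem_map] at hp
    rcases hp with h | ⟨q, hq, rfl⟩
    · subst h; simp
    · have := ih q hq; simp; omega

def pvEdgeInfo (u : Int) (v : Int) : (Int × Int) × Int :=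
  if u < v then ((u, v), 1) else ((v, u), -1)

def pvDfs (targets : PySem.Set (Int × Int)) (tlen : Int) (v0 : Int) (last : Int)
    (remaining : List Int) (sign : Int) (matched : List (Int × Int)) : Int :=
  match remaining with
  | [] =>
    let e := (pvEdgeInfo last v0).1
    let sm :=
      if PySem.Set.contains targets e then (sign * (pvEdgeInfo last v0).2, matched ++ [e])
      else (sign, matched)
    if (sm.2.length : Int) = tlen ∧ PySem.Set.equal (PySem.Set.ofList sm.2) targets = true
    then sm.1 else 0
  | w0 :: tl =>
    (pvSplits (w0 :: tl)).attach.foldl (fun acc q =>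
      let w := q.1.1
      let e := (pvEdgeInfo last w).1
      if PySem.Set.contains targets e then
        if (matched.length : Int) < tlen then
          acc + pvDfs targets tlen v0 w q.1.2 (sign * (pvEdgeInfo last w).2) (matched ++ [e])
        else acc
      else acc + pvDfs targets tlen v0 w q.1.2 sign matched) 0
  termination_by remaining.length
  decreasing_by
    · have h := pvSplits_length (w0 :: tl) q.1 q.2; simp at h ⊢; omega
    · have h := pvSplits_length (w0 :: tl) q.1 q.2; simp at h ⊢; omega

def pvLoopB (target_set : PySem.Set (Int × Int)) (tlen : Int) (subsets : List (List Int)) : Int :=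
  subsets.foldl (fun total subset =>
    match subset with
    | [] => total  -- Python raises IndexError on subset[0] here; unreachable under Pre_
    | v0 :: _ => total + pvDfs target_set tlen v0 v0 (subset.filter (fun v => v != v0)) 1 []) 0

def count_directed_cycles_with_edges_alt (k : Int) (target_edges : List (Int × Int)) (n_verts : Int) : Int :=
  let target_set : PySem.Set (Int × Int) := PySem.Set.ofList target_edges
  let tlen : Int := PySem.Set.len target_set
  let target_verts : PySem.Set Int :=
    target_set.foldl (fun s e => PySem.Set.add (PySem.Set.add s e.1) e.2) PySem.Set.empty
  if k == n_verts then
    pvLoopB target_set tlen [PySem.List.pyRange 0 n_verts 1]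
  else
    let other : PySem.Set Int :=
      PySem.Set.diff (PySem.Set.ofList (PySem.List.pyRange 0 n_verts 1)) target_verts
    let need : Int := k - PySem.Set.len target_verts
    if need < 0 then 0
    else
      -- same short-circuit as in port A (itertools.combinations is empty for r > len(pool))
      pvLoopB target_set tlen
        ((if other.length < need.toNat then []
          else PySem.List.combinations other need.toNat).map (fun extra =>
          PySem.List.sorted (PySem.Set.union target_verts extra) (fun x => x) false))

-- ===== PRECONDITION & SPEC =====
-- Pre_ excludes exactly the inputs on which A raises IndexError at subset[0] (an empty candidate
-- subset arises: k = n_verts <= 0, or k = 0 /= n_verts with no target edges); B raises there too.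
def Pre_count_directed_cycles_with_edges (k : Int) (target_edges : List (Int × Int)) (n_verts : Int) : Prop :=
  ¬(k = n_verts ∧ n_verts ≤ 0) ∧ ¬(k = 0 ∧ k ≠ n_verts ∧ target_edges = [])
instance (k : Int) (target_edges : List (Int × Int)) (n_verts : Int) :
    Decidable (Pre_count_directed_cycles_with_edges k target_edges n_verts) := by
  unfold Pre_count_directed_cycles_with_edges; infer_instance

def pvWitness_count_directed_cycles_with_edges : Int × (List (Int × Int)) × Int := (3, [(0, 1)], 4)

-- Spec follows (seeded)
def Spec_count_directed_cycles_with_edges (k : Int) (target_edges : List (Int × Int)) (n_verts : Int) (out : Int) : Prop := out = count_directed_cycles_with_edges_alt k target_edges n_verts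
instance (k : Int) (target_edges : List (Int × Int)) (n_verts : Int) (out : Int) : Decidable (Spec_count_directed_cycles_with_edges k target_edges n_verts out) := by unfold Spec_count_directed_cycles_with_edges; infer_instance

-- ===== CLAIM (what is proved, stated in full; the proofs are below) =====
def Claim_equal_count_directed_cycles_with_edges : Prop := ∀ (k : Int) (target_edges : List (Int × Int)) (n_verts : Int), Dom_count_directed_cycles_with_edges k target_edges n_verts → Pre_count_directed_cycles_with_edges k target_edges n_verts → Spec_count_directed_cycles_with_edges k target_edges n_verts (count_directed_cycles_with_edges k target_edges n_verts)

-- ===== LEMMAS AND PROOFS =====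

theorem pvPermutations_succ {α : Type} (xs : List α) (r : Nat) :
    PySem.List.permutations xs (r + 1) = (List.range xs.length).flatMap (fun i =>
      match xs[i]? with
      | none => []
      | some y => (PySem.List.permutations (xs.eraseIdx i) r).map (y :: ·)) := by
  rw [PySem.List.permutations.eq_def]; rfl

-- proof-side evaluator: processes the directed edges of a cycle one at a time,
-- accumulating the sign product and the matched (normalized) target edges
def pvEval (targets : PySem.Set (Int × Int)) (tlen : Int) :
    List (Int × Int) → Int → List (Int × Int) → Int
  | [], sign, matched =>
      if (matched.length : Int) = tlen ∧ PySem.Set.equal (PySem.Set.ofList matched) targets = true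
      then sign else 0
  | (u, v) :: es, sign, matched =>
      if PySem.Set.contains targets (pvEdgeInfo u v).1 then
        pvEval targets tlen es (sign * (pvEdgeInfo u v).2) (matched ++ [(pvEdgeInfo u v).1])
      else pvEval targets tlen es sign matched

theorem pvEval_closed (targets : PySem.Set (Int × Int)) (tlen : Int) :
    ∀ (es : List (Int × Int)) (sign : Int) (matched : List (Int × Int)),
    pvEval targets tlen es sign matched =
      (if ((matched.length : Int) +
            (((es.map (fun uv => pvEdgeInfo uv.1 uv.2)).filter
              (fun p => PySem.Set.contains targets p.1)).length : Int) = tlen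
          ∧ PySem.Set.equal (PySem.Set.ofList (matched ++
              ((es.map (fun uv => pvEdgeInfo uv.1 uv.2)).filter
                (fun p => PySem.Set.contains targets p.1)).map (fun p => p.1))) targets = true)
      then sign * (((es.map (fun uv => pvEdgeInfo uv.1 uv.2)).filter
              (fun p => PySem.Set.contains targets p.1)).map (fun p => p.2)).prod
      else 0) := by
  intro es
  induction es with
  | nil =>
    intro sign matched
    show (if (matched.length : Int) = tlen
        ∧ PySem.Set.equal (PySem.Set.ofList matched) targets = true then sign else 0) = _
    refine if_congr (and_congr (by simp) (by simp)) (by simp) rfl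
  | cons uv es ih =>
    intro sign matched
    obtain ⟨u, v⟩ := uv
    show (if PySem.Set.contains targets (pvEdgeInfo u v).1 then
        pvEval targets tlen es (sign * (pvEdgeInfo u v).2) (matched ++ [(pvEdgeInfo u v).1])
      else pvEval targets tlen es sign matched) = _
    by_cases h : PySem.Set.contains targets (pvEdgeInfo u v).1 = true
    · rw [if_pos h, ih]
      simp only [List.map_cons, List.filter_cons, h, if_true]
      refine if_congr (and_congr ?_ ?_) ?_ rfl
      · simp only [List.length_append, List.length_cons, List.length_nil]
        push_cast
        constructor <;> intro <;> omega
      · rw [List.append_assoc, List.singleton_append]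
      · simp only [List.prod_cons]; ring
    · rw [if_neg h, ih]
      have h' : PySem.Set.contains targets (pvEdgeInfo u v).1 = false := by
        simpa using h
      simp only [List.map_cons, List.filter_cons, h', Bool.false_eq_true, if_false]

theorem pvEval_zero (targets : PySem.Set (Int × Int)) (tlen : Int)
    (es : List (Int × Int)) (sign : Int) (matched : List (Int × Int))
    (h : tlen < (matched.length : Int)) :
    pvEval targets tlen es sign matched = 0 := by
  rw [pvEval_closed]
  apply if_neg
  rintro ⟨h1, -⟩
  have h2 : (0 : Int) ≤ (((es.map (fun uv => pvEdgeInfo uv.1 uv.2)).filter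
      (fun p => PySem.Set.contains targets p.1)).length : Int) := by positivity
  omega

theorem pvSplits_flatMap {α β : Type} :
    ∀ (xs : List α) (f : α → List α → List β),
    (List.range xs.length).flatMap (fun i =>
        match xs[i]? with
        | none => []
        | some y => f y (xs.eraseIdx i))
      = (pvSplits xs).flatMap (fun p => f p.1 p.2) := by
  intro xs
  induction xs with
  | nil => intro f; simp [pvSplits]
  | cons x t ih =>
    intro f
    rw [List.length_cons, List.range_succ_eq_map, List.flatMap_cons, List.flatMap_map]
    have hbody : (fun (i : Nat) =>
        match (x :: t)[i.succ]? with
        | none => ([] : List β)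
        | some y => f y ((x :: t).eraseIdx i.succ))
        = (fun (i : Nat) =>
        match t[i]? with
        | none => ([] : List β)
        | some y => (fun y r => f y (x :: r)) y (t.eraseIdx i)) := by
      funext i
      cases ht : t[i]? <;> simp [List.getElem?_cons_succ, ht]
    rw [hbody, ih (fun y r => f y (x :: r))]
    simp [pvSplits, List.flatMap_map]

theorem pvPermutations_splits {α : Type} (xs : List α) (r : Nat) :
    PySem.List.permutations xs (r + 1)
      = (pvSplits xs).flatMap (fun p => (PySem.List.permutations p.2 r).map (p.1 :: ·)) := by
  rw [pvPermutations_succ]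
  exact pvSplits_flatMap xs (fun y rem => (PySem.List.permutations rem r).map (y :: ·))

theorem pvSum_flatMap {α β : Type} [AddCommMonoid β] (l : List α) (g : α → List β) :
    (l.flatMap g).sum = (l.map (fun a => (g a).sum)).sum := by
  induction l with
  | nil => simp
  | cons x t ih => simp [List.flatMap_cons, ih]

theorem pvPerm_length {α : Type} {xs p : List α}
    (h : p ∈ PySem.List.permutations xs xs.length) : p.length = xs.length :=
  (PySem.List.perm_of_mem_permutations h).length_eq

theorem pvDfs_eq_sum (targets : PySem.Set (Int × Int)) (tlen : Int) (v0 : Int) :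
    ∀ (n : Nat) (remaining : List Int), remaining.length = n →
    ∀ (last sign : Int) (matched : List (Int × Int)),
    pvDfs targets tlen v0 last remaining sign matched =
      ((PySem.List.permutations remaining remaining.length).map (fun perm =>
        pvEval targets tlen ((last :: perm).zip (perm ++ [v0])) sign matched)).sum := by
  intro n
  induction n with
  | zero =>
    intro remaining h last sign matched
    have hr : remaining = [] := List.eq_nil_of_length_eq_zero h
    subst hr
    rw [pvDfs]
    have hrw : (PySem.List.permutations ([] : List Int) ([] : List Int).length).map
        (fun perm => pvEval targets tlen ((last :: perm).zip (perm ++ [v0])) sign matched)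
        = [pvEval targets tlen [(last, v0)] sign matched] := rfl
    rw [hrw]
    simp only [List.sum_cons, List.sum_nil, add_zero]
    rcases Bool.eq_false_or_eq_true (PySem.Set.contains targets (pvEdgeInfo last v0).1)
      with hcc | hcc <;>
      simp only [pvEval, hcc, Bool.false_eq_true, if_true, if_false]
  | succ n ih =>
    intro remaining h last sign matched
    cases remaining with
    | nil => simp at h
    | cons w0 tl =>
    rw [pvDfs]
    rw [List.foldl_attach
      (f := fun acc (p : Int × List Int) =>
        if PySem.Set.contains targets (pvEdgeInfo last p.1).1 then
          if (matched.length : Int) < tlen then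
            acc + pvDfs targets tlen v0 p.1 p.2 (sign * (pvEdgeInfo last p.1).2)
              (matched ++ [(pvEdgeInfo last p.1).1])
          else acc
        else acc + pvDfs targets tlen v0 p.1 p.2 sign matched)]
    rw [PySem.List.foldl_congr_mem (pvSplits (w0 :: tl)) _
      (fun acc (p : Int × List Int) => acc +
        (if PySem.Set.contains targets (pvEdgeInfo last p.1).1 then
          if (matched.length : Int) < tlen then
            pvDfs targets tlen v0 p.1 p.2 (sign * (pvEdgeInfo last p.1).2)
              (matched ++ [(pvEdgeInfo last p.1).1])
          else 0
        else pvDfs targets tlen v0 p.1 p.2 sign matched)) 0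
      (by
        intro acc p _
        dsimp only
        rcases Bool.eq_false_or_eq_true (PySem.Set.contains targets (pvEdgeInfo last p.1).1)
          with h1 | h1
        · rw [if_pos h1, if_pos h1]
          by_cases h2 : (matched.length : Int) < tlen
          · rw [if_pos h2, if_pos h2]
          · rw [if_neg h2, if_neg h2]; ring
        · rw [if_neg (by rw [h1]; exact Bool.false_ne_true),
            if_neg (by rw [h1]; exact Bool.false_ne_true)])]
    rw [PySem.List.foldl_add, zero_add]
    conv_rhs => rw [show (w0 :: tl).length = n + 1 from h]
    rw [pvPermutations_splits]
    rw [List.map_flatMap, pvSum_flatMap]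
    apply congrArg
    apply List.map_congr_left
    intro p hp
    have hlen : p.2.length = n := by
      have hs := pvSplits_length (w0 :: tl) p hp
      have h' : tl.length + 1 = n + 1 := by simpa using h
      simp only [List.length_cons] at hs
      omega
    rw [List.map_map]
    have hzip : ∀ (q : List Int),
        ((last :: p.1 :: q).zip ((p.1 :: q) ++ [v0]))
          = (last, p.1) :: ((p.1 :: q).zip (q ++ [v0])) := by
      intro q; simp [List.zip_cons_cons]
    have hperm : PySem.List.permutations p.2 p.2.length = PySem.List.permutations p.2 n := by
      rw [hlen]
    by_cases hc : PySem.Set.contains targets (pvEdgeInfo last p.1).1 = true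
    · by_cases hm : (matched.length : Int) < tlen
      · rw [if_pos hc, if_pos hm]
        have hstep : ∀ q ∈ PySem.List.permutations p.2 n,
            ((fun perm => pvEval targets tlen ((last :: perm).zip (perm ++ [v0])) sign matched) ∘
              (fun x => p.1 :: x)) q
            = pvEval targets tlen ((p.1 :: q).zip (q ++ [v0])) (sign * (pvEdgeInfo last p.1).2)
                (matched ++ [(pvEdgeInfo last p.1).1]) := by
          intro q hq
          show pvEval targets tlen ((last :: p.1 :: q).zip ((p.1 :: q) ++ [v0])) sign matched = _
          rw [hzip]
          show (if PySem.Set.contains targets (pvEdgeInfo last p.1).1 then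
              pvEval targets tlen ((p.1 :: q).zip (q ++ [v0])) (sign * (pvEdgeInfo last p.1).2)
                (matched ++ [(pvEdgeInfo last p.1).1])
            else pvEval targets tlen ((p.1 :: q).zip (q ++ [v0])) sign matched) = _
          rw [if_pos hc]
        rw [List.map_congr_left hstep]
        have hih := ih p.2 hlen p.1 (sign * (pvEdgeInfo last p.1).2)
          (matched ++ [(pvEdgeInfo last p.1).1])
        rw [hperm] at hih
        rw [hih]
      · rw [if_pos hc, if_neg hm]
        symm
        apply List.sum_eq_zero
        intro x hx
        simp only [List.mem_map, Function.comp_apply] at hx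
        obtain ⟨q, hq, rfl⟩ := hx
        show pvEval targets tlen ((last :: p.1 :: q).zip ((p.1 :: q) ++ [v0])) sign matched = 0
        rw [hzip]
        show (if PySem.Set.contains targets (pvEdgeInfo last p.1).1 then
            pvEval targets tlen ((p.1 :: q).zip (q ++ [v0])) (sign * (pvEdgeInfo last p.1).2)
              (matched ++ [(pvEdgeInfo last p.1).1])
          else pvEval targets tlen ((p.1 :: q).zip (q ++ [v0])) sign matched) = 0
        rw [if_pos hc]
        apply pvEval_zero
        simp only [List.length_append, List.length_cons, List.length_nil]
        push_cast
        omega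
    · rw [if_neg hc]
      have hstep : ∀ q ∈ PySem.List.permutations p.2 n,
          ((fun perm => pvEval targets tlen ((last :: perm).zip (perm ++ [v0])) sign matched) ∘
            (fun x => p.1 :: x)) q
          = pvEval targets tlen ((p.1 :: q).zip (q ++ [v0])) sign matched := by
        intro q hq
        show pvEval targets tlen ((last :: p.1 :: q).zip ((p.1 :: q) ++ [v0])) sign matched = _
        rw [hzip]
        show (if PySem.Set.contains targets (pvEdgeInfo last p.1).1 then
            pvEval targets tlen ((p.1 :: q).zip (q ++ [v0])) (sign * (pvEdgeInfo last p.1).2)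
              (matched ++ [(pvEdgeInfo last p.1).1])
          else pvEval targets tlen ((p.1 :: q).zip (q ++ [v0])) sign matched) = _
        rw [if_neg hc]
      rw [List.map_congr_left hstep]
      have hih := ih p.2 hlen p.1 sign matched
      rw [hperm] at hih
      rw [hih]

theorem pvMinMax (u v : Int) :
    ((min u v, max u v), directed_sign u v) = pvEdgeInfo u v := by
  by_cases h : u < v
  · simp [pvEdgeInfo, directed_sign, h, min_eq_left h.le, max_eq_right h.le]
  · have h2 : v ≤ u := not_lt.mp h
    simp [pvEdgeInfo, directed_sign, h, min_eq_right h2, max_eq_left h2]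

theorem pvIdx {β : Type} (v0 : Int) (perm : List Int) (g : Int → Int → β) :
    (PySem.List.pyRange 0 (((v0 :: perm).length : Nat) : Int) 1).map (fun i =>
        g (PySem.List.pyGetD (v0 :: perm) i 0)
          (PySem.List.pyGetD (v0 :: perm) (PySem.Int.mod (i + 1) (((v0 :: perm).length : Nat) : Int)) 0))
      = ((v0 :: perm).zip (perm ++ [v0])).map (fun uv => g uv.1 uv.2) := by
  rw [PySem.List.pyRange_zero_nat, List.map_map]
  apply List.ext_getElem
  · simp
  · intro j h1 h2
    have h1' : j < (v0 :: perm).length := by simpa using h1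
    have hn : 0 < (v0 :: perm).length := by simp
    simp only [List.getElem_map, List.getElem_range, Function.comp_apply, List.getElem_zip]
    have e1 : PySem.List.pyGetD (v0 :: perm) ((j : Nat) : Int) 0 = (v0 :: perm)[j] := by
      rw [PySem.List.pyGetD_natCast, List.getD_eq_getElem _ _ h1']
    have hb : j < (perm ++ [v0]).length := by simpa using h1'
    have e2 : PySem.List.pyGetD (v0 :: perm)
        (PySem.Int.mod (((j : Nat) : Int) + 1) (((v0 :: perm).length : Nat) : Int)) 0
        = (perm ++ [v0])[j] := by
      have hc : (((j : Nat) : Int) + 1) = (((j + 1 : Nat) : Nat) : Int) := by push_cast; ring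
      rw [hc, PySem.Int.mod_natCast, PySem.List.pyGetD_natCast]
      rcases Nat.lt_or_ge (j + 1) (v0 :: perm).length with hj | hj
      · have hjp : j < perm.length := by simp at hj; omega
        rw [Nat.mod_eq_of_lt hj, List.getD_eq_getElem _ _ hj]
        simp [hjp]
      · have hje : j = perm.length := by simp at h1' hj; omega
        subst hje
        have hm : (perm.length + 1) % (v0 :: perm).length = 0 := by simp
        rw [hm, List.getD_eq_getElem _ _ hn]
        simp
    rw [e1, e2]

theorem pvEnumFilter (ts : PySem.Set (Int × Int)) (ce : List ((Int × Int) × Int))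
    (d : (Int × Int) × Int) :
    ((((PySem.List.enumerate ce).filter (fun pes => PySem.Set.contains ts pes.2.1)).map
        (fun pes => pes.1)).map (fun p => PySem.List.pyGetD ce p d))
      = ce.filter (fun e => PySem.Set.contains ts e.1) := by
  rw [PySem.List.enumerate_eq_map_pyRange ce d, List.filter_map, List.map_map, List.map_map]
  show ((PySem.List.pyRange 0 (PySem.List.len ce)).filter
      ((fun e : (Int × Int) × Int => PySem.Set.contains ts e.1) ∘
        (fun j : Int => PySem.List.pyGetD ce j d))).map
      (fun j : Int => PySem.List.pyGetD ce j d) = ce.filter (fun e => PySem.Set.contains ts e.1)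
  rw [← List.filter_map]
  rw [PySem.List.map_pyGetD_pyRange_zero]

-- proof-side names for the pieces of A's per-permutation body
def pvCe (k : Int) (cycle : List Int) : List ((Int × Int) × Int) :=
  (PySem.List.pyRange 0 k 1).map (fun i =>
    ((min (PySem.List.pyGetD cycle i 0) (PySem.List.pyGetD cycle (PySem.Int.mod (i + 1) k) 0),
      max (PySem.List.pyGetD cycle i 0) (PySem.List.pyGetD cycle (PySem.Int.mod (i + 1) k) 0)),
     directed_sign (PySem.List.pyGetD cycle i 0)
       (PySem.List.pyGetD cycle (PySem.Int.mod (i + 1) k) 0)))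

def pvMtch (ts : PySem.Set (Int × Int)) (ce : List ((Int × Int) × Int)) : List Int :=
  ((PySem.List.enumerate ce).filter (fun pes => PySem.Set.contains ts pes.2.1)).map
    (fun pes => pes.1)

def pvContribA (k : Int) (ts : PySem.Set (Int × Int)) (v0 : Int) (perm : List Int) : Int :=
  if ((pvMtch ts (pvCe k (v0 :: perm))).length : Int) ≠ PySem.Set.len ts then 0
  else if PySem.Set.equal (PySem.Set.ofList ((pvMtch ts (pvCe k (v0 :: perm))).map
      (fun p => (PySem.List.pyGetD (pvCe k (v0 :: perm)) p ((0, 0), 0)).1))) ts = false then 0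
  else (pvMtch ts (pvCe k (v0 :: perm))).foldl
      (fun sp p => sp * (PySem.List.pyGetD (pvCe k (v0 :: perm)) p ((0, 0), 0)).2) 1

theorem pvCe_eq (v0 : Int) (perm : List Int) :
    pvCe (((v0 :: perm).length : Nat) : Int) (v0 :: perm)
      = ((v0 :: perm).zip (perm ++ [v0])).map (fun uv => pvEdgeInfo uv.1 uv.2) := by
  rw [← pvIdx v0 perm (fun u v => pvEdgeInfo u v)]
  unfold pvCe
  apply List.map_congr_left
  intro i _
  exact pvMinMax _ _

theorem pvContribA_eval (ts : PySem.Set (Int × Int)) (v0 : Int) (perm : List Int) :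
    pvContribA (((v0 :: perm).length : Nat) : Int) ts v0 perm
      = pvEval ts (PySem.Set.len ts) ((v0 :: perm).zip (perm ++ [v0])) 1 [] := by
  unfold pvContribA
  rw [pvCe_eq, pvEval_closed]
  set CE := ((v0 :: perm).zip (perm ++ [v0])).map (fun uv => pvEdgeInfo uv.1 uv.2) with hCE
  set F := CE.filter (fun e => PySem.Set.contains ts e.1) with hF
  have hmap : (pvMtch ts CE).map (fun p => PySem.List.pyGetD CE p ((0, 0), 0)) = F := by
    rw [hF]; exact pvEnumFilter ts CE ((0, 0), 0)
  have hlen : ((pvMtch ts CE).length : Int) = (F.length : Int) := by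
    have h := congrArg List.length hmap
    simp only [List.length_map] at h
    exact_mod_cast h
  have hfst : (pvMtch ts CE).map (fun p => (PySem.List.pyGetD CE p ((0, 0), 0)).1)
      = F.map (fun p => p.1) := by
    rw [← hmap, List.map_map]
    rfl
  have hsp : (pvMtch ts CE).foldl
      (fun sp p => sp * (PySem.List.pyGetD CE p ((0, 0), 0)).2) 1
      = (F.map (fun p => p.2)).prod := by
    rw [List.prod_eq_foldl, List.foldl_map, ← hmap, List.foldl_map]
  rw [hfst, hsp, hlen]
  simp only [List.length_nil, Nat.cast_zero, zero_add, List.nil_append, one_mul]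
  by_cases c1 : ((F.length : Int)) = PySem.Set.len ts
  · rw [if_neg (not_not_intro c1)]
    rcases Bool.eq_false_or_eq_true
      (PySem.Set.equal (PySem.Set.ofList (F.map (fun p => p.1))) ts) with c2 | c2
    · rw [if_neg (by simp [c2]), if_pos ⟨c1, c2⟩]
    · rw [if_pos c2, if_neg (by rintro ⟨-, hx⟩; rw [c2] at hx; simp at hx)]
  · rw [if_pos c1, if_neg (by rintro ⟨hx, -⟩; exact c1 hx)]

theorem pvFilterNe (v0 : Int) (t : List Int) (h : (v0 :: t).Nodup) :
    (v0 :: t).filter (fun v => v != v0) = t := by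
  have h0 : v0 ∉ t := (List.nodup_cons.mp h).1
  simp only [List.filter_cons, bne_self_eq_false, Bool.false_eq_true, if_false]
  apply List.filter_eq_self.mpr
  intro a ha
  exact bne_iff_ne.mpr (fun heq => h0 (heq ▸ ha))

-- A's complete per-subset loop equals B's per-subset DFS call
theorem pvSubsetA (k : Int) (ts : PySem.Set (Int × Int)) (v0 : Int) (t : List Int)
    (hnd : (v0 :: t).Nodup) (hk : (((v0 :: t).length : Nat) : Int) = k) (total : Int) :
    ((PySem.List.permutations ((v0 :: t).filter (fun v => v != v0))
        ((v0 :: t).filter (fun v => v != v0)).length).foldl (fun total perm =>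
      let cycle := v0 :: perm
      let ce := (PySem.List.pyRange 0 k 1).map (fun i =>
        let u := PySem.List.pyGetD cycle i 0
        let v := PySem.List.pyGetD cycle (PySem.Int.mod (i + 1) k) 0
        ((min u v, max u v), directed_sign u v))
      let mtch := ((PySem.List.enumerate ce).filter
        (fun pes => PySem.Set.contains ts pes.2.1)).map (fun pes => pes.1)
      if (mtch.length : Int) ≠ PySem.Set.len ts then total
      else if PySem.Set.equal
          (PySem.Set.ofList (mtch.map (fun p => (PySem.List.pyGetD ce p ((0, 0), 0)).1)))
          ts = false then total
      else total + mtch.foldl (fun sp p => sp * (PySem.List.pyGetD ce p ((0, 0), 0)).2) 1)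
      total)
    = total + pvDfs ts (PySem.Set.len ts) v0 v0 ((v0 :: t).filter (fun v => v != v0)) 1 [] := by
  rw [pvFilterNe v0 t hnd]
  refine (PySem.List.foldl_congr_mem _ _
    (fun total perm => total + pvContribA k ts v0 perm) total ?_).trans ?_
  · intro acc perm _
    show (if ((pvMtch ts (pvCe k (v0 :: perm))).length : Int) ≠ PySem.Set.len ts then acc
      else if PySem.Set.equal (PySem.Set.ofList ((pvMtch ts (pvCe k (v0 :: perm))).map
          (fun p => (PySem.List.pyGetD (pvCe k (v0 :: perm)) p ((0, 0), 0)).1))) ts = false then acc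
      else acc + (pvMtch ts (pvCe k (v0 :: perm))).foldl
          (fun sp p => sp * (PySem.List.pyGetD (pvCe k (v0 :: perm)) p ((0, 0), 0)).2) 1)
      = acc + pvContribA k ts v0 perm
    unfold pvContribA
    by_cases c1 : ((pvMtch ts (pvCe k (v0 :: perm))).length : Int) ≠ PySem.Set.len ts
    · rw [if_pos c1, if_pos c1]; ring
    · rw [if_neg c1, if_neg c1]
      rcases Bool.eq_false_or_eq_true (PySem.Set.equal
        (PySem.Set.ofList ((pvMtch ts (pvCe k (v0 :: perm))).map
          (fun p => (PySem.List.pyGetD (pvCe k (v0 :: perm)) p ((0, 0), 0)).1))) ts)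
        with c2 | c2
      · rw [if_neg (by simp [c2]), if_neg (by simp [c2])]
      · rw [if_pos c2, if_pos c2]; ring
  · rw [PySem.List.foldl_add]
    congr 1
    rw [pvDfs_eq_sum ts (PySem.Set.len ts) v0 t.length t rfl v0 1 []]
    apply congrArg
    apply List.map_congr_left
    intro perm hperm
    have hpl : perm.length = t.length := pvPerm_length hperm
    have hk2 : (((v0 :: perm).length : Nat) : Int) = k := by
      simp only [List.length_cons] at hk ⊢
      omega
    rw [← hk2]
    exact pvContribA_eval ts v0 perm

theorem pvLoop_eq (k : Int) (ts : PySem.Set (Int × Int)) (subsets : List (List Int))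
    (h : ∀ s ∈ subsets, ((s.length : Nat) : Int) = k ∧ s.Nodup) :
    pvLoopA k ts subsets = pvLoopB ts (PySem.Set.len ts) subsets := by
  unfold pvLoopA pvLoopB
  apply PySem.List.foldl_congr_mem
  intro total s hs
  cases s with
  | nil => rfl
  | cons v0 t => exact pvSubsetA k ts v0 t (h _ hs).2 (h _ hs).1 total

theorem pvTVNodup (l : List (Int × Int)) :
    ∀ (s0 : PySem.Set Int), s0.Nodup →
      (l.foldl (fun s e => PySem.Set.add (PySem.Set.add s e.1) e.2) s0).Nodup := by
  induction l with
  | nil => intro s0 h; exact h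
  | cons e l ih =>
    intro s0 h
    exact ih _ (PySem.Set.nodup_add _ _ (PySem.Set.nodup_add _ _ h))

-- ===== VERDICT (by name: the statement is the Claim_ definition above) =====
theorem count_directed_cycles_with_edges_spec : Claim_equal_count_directed_cycles_with_edges := by
  intro k target_edges n_verts hdom hpre
  unfold Spec_count_directed_cycles_with_edges
  simp only [count_directed_cycles_with_edges, count_directed_cycles_with_edges_alt]
  split_ifs with hk hneed hcl
  · -- k == n_verts
    apply pvLoop_eq
    intro s hs
    simp only [List.mem_singleton] at hs
    subst hs
    have hkn : k = n_verts := by simpa using hk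
    have hn : 0 < n_verts := by
      by_contra hh
      exact hpre.1 ⟨hkn, by omega⟩
    constructor
    · rw [PySem.List.length_pyRange_one]
      omega
    · exact PySem.List.nodup_pyRange_one 0 n_verts
  · rfl
  · rfl
  · -- main else branch
    apply pvLoop_eq
    intro s hs
    simp only [List.mem_map] at hs
    obtain ⟨extra, hex, rfl⟩ := hs
    obtain ⟨hsub, hexlen⟩ := (PySem.List.mem_combinations_iff _ _ _).mp hex
    have hTVnd : ((PySem.Set.ofList target_edges).foldl
        (fun s e => PySem.Set.add (PySem.Set.add s e.1) e.2) PySem.Set.empty).Nodup :=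
      pvTVNodup _ _ List.nodup_nil
    have hOnd : (PySem.Set.diff (PySem.Set.ofList (PySem.List.pyRange 0 n_verts 1))
        ((PySem.Set.ofList target_edges).foldl
          (fun s e => PySem.Set.add (PySem.Set.add s e.1) e.2) PySem.Set.empty)).Nodup :=
      PySem.Set.nodup_diff _ _ (PySem.Set.nodup_ofList _)
    have hexnd : extra.Nodup := hsub.nodup hOnd
    have hdisj : ∀ x ∈ extra, x ∉ ((PySem.Set.ofList target_edges).foldl
        (fun s e => PySem.Set.add (PySem.Set.add s e.1) e.2) PySem.Set.empty) := by
      intro x hx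
      exact ((PySem.Set.mem_diff _ _ x).mp (hsub.subset hx)).2
    have hunion : PySem.Set.union ((PySem.Set.ofList target_edges).foldl
        (fun s e => PySem.Set.add (PySem.Set.add s e.1) e.2) PySem.Set.empty) extra
        = ((PySem.Set.ofList target_edges).foldl
          (fun s e => PySem.Set.add (PySem.Set.add s e.1) e.2) PySem.Set.empty) ++ extra :=
      PySem.Set.update_eq_append_of_disjoint _ extra hexnd hdisj
    constructor
    · rw [PySem.List.length_sorted, hunion, List.length_append, hexlen]
      simp only [PySem.Set.len] at hneed ⊢
      push_cast
      omega
    · exact ((PySem.List.sorted_perm _ _ _).nodup_iff).mpr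
        (PySem.Set.nodup_union _ extra hTVnd)
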